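-- pv_equiv track=rewrite | github.com/emilianoPiz/repo_esercizi | algoritmi/esercizi_generati.py | es2
-- ===== SOURCE A (Python) =====
-- def es2(A):
--     n = len(A)
--
--     if n == 0:
--         return -1
--
--     i = 0
--     max_sinistra = -float('inf')
--
--     while i < n:
--         if A[i] <= max_sinistra:
--             i += 1
--             continue
--
--         j = i + 1
--         failed = False
--         while j < n:
--             if A[j] < A[i]:
--                 failed = True
--                 max_sinistra = A[i]
--                 i = j
--                 break
--             j += 1
--
--         if not failed:
--             return i
--
--
--     return -1
-- ===== SOURCE B (Python) =====
-- def es2(A):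
--     n = len(A)
--     # next-smaller-element table via right-to-left monotonic stack:
--     # nse[i] = first j > i with A[j] < A[i], else n
--     nse = [n] * n
--     stack = []  # pairs (index, value); values strictly increasing from top
--     for i in range(n - 1, -1, -1):
--         v = A[i]
--         while stack and stack[-1][1] >= v:
--             stack.pop()
--         if stack:
--             nse[i] = stack[-1][0]
--         stack.append((i, v))
--     # outer pass: skip elements <= threshold, jump along the NSE table
--     i = 0
--     thr = None  # None stands for -infinity
--     while i < n:
--         v = A[i]
--         if thr is not None and v <= thr:
--             i += 1
--             continue
--         j = nse[i]
--         if j == n: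
--             return i
--         thr = v
--         i = j
--     return -1
-- ===== Notes on version B (the rewrite author's own statement) =====
-- stated objective: alternative
-- what changed: B precomputes a next-smaller-element table with a right-to-left monotonic stack and replaces A's inner rescanning while-loop by a single table lookup per jump.
import Mathlib
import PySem

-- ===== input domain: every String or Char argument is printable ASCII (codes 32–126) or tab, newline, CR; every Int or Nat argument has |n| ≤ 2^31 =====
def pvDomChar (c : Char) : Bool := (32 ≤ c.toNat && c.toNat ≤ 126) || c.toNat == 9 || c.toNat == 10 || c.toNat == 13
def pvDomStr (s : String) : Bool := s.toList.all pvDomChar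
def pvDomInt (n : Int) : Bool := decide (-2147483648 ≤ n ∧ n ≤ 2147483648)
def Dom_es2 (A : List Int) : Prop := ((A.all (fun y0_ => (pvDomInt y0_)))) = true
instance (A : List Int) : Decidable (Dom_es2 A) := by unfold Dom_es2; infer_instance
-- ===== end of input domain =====

-- B replaces A's inner rescanning loop by a next-smaller-element table built with a
-- right-to-left monotonic stack (alternative decomposition; same asymptotic cost).


-- ===== PORT A =====
-- inner while-loop of A: first index j' ≥ j with A[j'] < x, none if there is none
-- (fuel is a totality device only; A.length fuel always suffices)
def es2Inner (A : List Int) (x : Int) (fuel j : Nat) : Option Nat :=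
  match fuel with
  | 0 => none
  | fuel + 1 =>
    if h : j < A.length then
      if A[j] < x then some j else es2Inner A x fuel (j + 1)
    else none

-- outer while-loop of A; thr = max_sinistra, none stands for -float('inf')
def es2Outer (A : List Int) (fuel : Nat) (i : Nat) (thr : Option Int) : Int :=
  match fuel with
  | 0 => -1
  | fuel + 1 =>
    if h : i < A.length then
      let v := A[i]
      if (match thr with | some t => decide (v ≤ t) | none => false) then
        es2Outer A fuel (i + 1) thr
      else
        match es2Inner A v A.length (i + 1) with
        | none => (i : Int)
        | some j => es2Outer A fuel j (some v)
    else -1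

def es2 (A : List Int) : Int :=
  if A.length = 0 then -1 else es2Outer A A.length 0 none

-- ===== PORT B =====
-- pop stack entries whose value is ≥ x (the while-pop of Source B)
def popGE (x : Int) : List (Nat × Int) → List (Nat × Int)
  | [] => []
  | (j, v) :: s => if x ≤ v then popGE x s else (j, v) :: s

-- index of the stack top, n if the stack is empty
def headIdx (n : Nat) : List (Nat × Int) → Nat
  | [] => n
  | (j, _) :: _ => j

-- right-to-left pass of Source B over (index, value) pairs: returns (final stack, nse table)
def nseGo (n : Nat) : List (Nat × Int) → List (Nat × Int) × List Nat
  | [] => ([], [])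
  | (i, v) :: rest =>
      let p := nseGo n rest
      let s' := popGE v p.1
      ((i, v) :: s', headIdx n s' :: p.2)

-- index the elements with Nat positions (hand-ported enumerate with Nat indices)
def enumNat (s : Nat) : List Int → List (Nat × Int)
  | [] => []
  | v :: t => (s, v) :: enumNat (s + 1) t

def nseOf (A : List Int) : List Nat := (nseGo A.length (enumNat 0 A)).2

-- outer while-loop of Source B: same skip/jump pass, the jump read off the nse table
-- (fuel is a totality device only; A.length fuel always suffices)
def es2AltOuter (A : List Int) (nse : List Nat) (fuel : Nat) (i : Nat) (thr : Option Int) : Int :=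
  match fuel with
  | 0 => -1
  | fuel + 1 =>
    if h : i < A.length then
      let v := A[i]
      if (match thr with | some t => decide (v ≤ t) | none => false) then
        es2AltOuter A nse fuel (i + 1) thr
      else
        if nse.getD i A.length = A.length then (i : Int)
        else es2AltOuter A nse fuel (nse.getD i A.length) (some v)
    else -1

def es2_alt (A : List Int) : Int := es2AltOuter A (nseOf A) A.length 0 none

-- ===== PRECONDITION & SPEC =====
def Spec_es2 (A : List Int) (out : Int) : Prop := out = es2_alt A
instance (A : List Int) (out : Int) : Decidable (Spec_es2 A out) := by unfold Spec_es2; infer_instance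

-- ===== CLAIM (what is proved, stated in full; the proofs are below) =====
def Claim_equal_es2 : Prop := ∀ (A : List Int), Dom_es2 A → Spec_es2 A (es2 A)

-- ===== LEMMAS AND PROOFS =====

-- the stack that nseGo maintains, as a recursive function of the suffix
def stackOf : List (Nat × Int) → List (Nat × Int)
  | [] => []
  | (i, v) :: rest => (i, v) :: popGE v (stackOf rest)

-- first index in the pair list whose value is < x (left-to-right scan)
def firstIn (x : Int) : List (Nat × Int) → Option Nat
  | [] => none
  | (j, v) :: rest => if v < x then some j else firstIn x rest

-- the nse table that nseGo produces, as a recursive function of the suffix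
def nseList (n : Nat) : List (Nat × Int) → List Nat
  | [] => []
  | (i, v) :: rest => (firstIn v rest).getD n :: nseList n rest

theorem es2Inner_bounds (A : List Int) (x : Int) (f j j' : Nat)
    (h : es2Inner A x f j = some j') : j ≤ j' ∧ j' < A.length := by
  induction f generalizing j with
  | zero => simp [es2Inner] at h
  | succ f ih =>
      rw [es2Inner] at h
      by_cases hj : j < A.length
      · rw [dif_pos hj] at h
        by_cases hlt : A[j] < x
        · rw [if_pos hlt] at h
          cases h
          exact ⟨le_refl _, hj⟩
        · rw [if_neg hlt] at h
          have := ih (j + 1) h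
          omega
      · rw [dif_neg hj] at h
        cases h

theorem popGE_popGE (x v : Int) (hxv : x ≤ v) (s : List (Nat × Int)) :
    popGE x (popGE v s) = popGE x s := by
  induction s with
  | nil => rfl
  | cons p t ih =>
      obtain ⟨k, w⟩ := p
      by_cases hvw : v ≤ w
      · have hxw : x ≤ w := le_trans hxv hvw
        simp [popGE, if_pos hvw, if_pos hxw, ih]
      · simp [popGE, if_neg hvw]

theorem headIdx_popGE_stackOf (n : Nat) (x : Int) (l : List (Nat × Int)) :
    headIdx n (popGE x (stackOf l)) = (firstIn x l).getD n := by
  induction l with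
  | nil => rfl
  | cons p rest ih =>
      obtain ⟨j, v⟩ := p
      by_cases hvx : v < x
      · have : ¬ x ≤ v := by omega
        simp [stackOf, popGE, firstIn, if_neg this, if_pos hvx, headIdx]
      · have hx : x ≤ v := by omega
        simp only [stackOf, popGE, if_pos hx, firstIn, if_neg hvx]
        rw [popGE_popGE x v hx, ih]

theorem nseGo_eq (n : Nat) (l : List (Nat × Int)) :
    nseGo n l = (stackOf l, nseList n l) := by
  induction l with
  | nil => rfl
  | cons p rest ih =>
      obtain ⟨i, v⟩ := p
      simp only [nseGo, ih, stackOf, nseList]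
      exact Prod.ext rfl (by rw [headIdx_popGE_stackOf])

theorem nseList_getD (n d : Nat) (l : List (Nat × Int)) (i : Nat) (h : i < l.length) :
    (nseList n l).getD i d = (firstIn (l[i].2) (l.drop (i + 1))).getD n := by
  induction l generalizing i with
  | nil => simp at h
  | cons p rest ih =>
      obtain ⟨j, v⟩ := p
      cases i with
      | zero => simp [nseList]
      | succ i =>
          simp only [nseList, List.getD_cons_succ, List.getElem_cons_succ, List.drop_succ_cons]
          exact ih i (by simpa using h)

theorem enumNat_length (s : Nat) (A : List Int) : (enumNat s A).length = A.length := by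
  induction A generalizing s with
  | nil => rfl
  | cons v t ih => simp [enumNat, ih]

theorem enumNat_getElem (s : Nat) (A : List Int) (i : Nat) (h : i < A.length) :
    (enumNat s A)[i]'(by rw [enumNat_length]; exact h) = (s + i, A[i]) := by
  induction A generalizing s i with
  | nil => simp at h
  | cons v t ih =>
      cases i with
      | zero => simp [enumNat]
      | succ i => simpa [enumNat, Nat.add_assoc, Nat.add_comm 1 i] using ih (s + 1) i (by simpa using h)

theorem enumNat_drop (s : Nat) (A : List Int) (j : Nat) :
    (enumNat s A).drop j = enumNat (s + j) (A.drop j) := by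
  induction A generalizing s j with
  | nil => simp [enumNat]
  | cons v t ih =>
      cases j with
      | zero => simp [enumNat]
      | succ j => simpa [enumNat, Nat.add_assoc, Nat.add_comm 1 j] using ih (s + 1) j

theorem firstIn_enumNat (A : List Int) (x : Int) (f j : Nat) (hf : A.length ≤ f + j) :
    firstIn x (enumNat j (A.drop j)) = es2Inner A x f j := by
  induction f generalizing j with
  | zero =>
      rw [List.drop_eq_nil_of_le (by omega)]
      rfl
  | succ f ih =>
      by_cases h : j < A.length
      · have hd : A.drop j = A[j] :: A.drop (j + 1) := List.drop_eq_getElem_cons h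
        rw [hd, es2Inner, dif_pos h]
        by_cases hlt : A[j] < x
        · simp [enumNat, firstIn, if_pos hlt]
        · simp only [enumNat, firstIn, if_neg hlt]
          exact ih (j + 1) (by omega)
      · rw [List.drop_eq_nil_of_le (by omega), es2Inner, dif_neg h]
        rfl

-- characterisation of the nse table: nse[i] = the result of A's inner scan from i+1 (n if none)
theorem nseOf_getD (A : List Int) (i : Nat) (h : i < A.length) :
    (nseOf A).getD i A.length = (es2Inner A (A[i]) A.length (i + 1)).getD A.length := by
  unfold nseOf
  rw [nseGo_eq]
  have hl : i < (enumNat 0 A).length := by rw [enumNat_length]; exact h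
  rw [nseList_getD A.length A.length (enumNat 0 A) i hl]
  rw [enumNat_getElem 0 A i h]
  rw [enumNat_drop, ← firstIn_enumNat A (A[i]) A.length (i + 1) (by omega)]
  simp

theorem outer_eq (A : List Int) (f i : Nat) (thr : Option Int) :
    es2Outer A f i thr = es2AltOuter A (nseOf A) f i thr := by
  induction f generalizing i thr with
  | zero => rfl
  | succ f ih =>
      rw [es2Outer, es2AltOuter]
      by_cases h : i < A.length
      case neg => rw [dif_neg h, dif_neg h]
      case pos =>
        rw [dif_pos h, dif_pos h]
        simp only
        by_cases hskip : (match thr with | some t => decide (A[i] ≤ t) | none => false) = true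
        · rw [if_pos hskip, if_pos hskip]
          exact ih (i + 1) thr
        · rw [if_neg hskip, if_neg hskip]
          cases hin : es2Inner A (A[i]) A.length (i + 1) with
          | none =>
              have : (nseOf A).getD i A.length = A.length := by
                rw [nseOf_getD A i h, hin]; rfl
              rw [this, if_pos rfl]
          | some j =>
              have hb := es2Inner_bounds A (A[i]) A.length (i + 1) j hin
              have hj : (nseOf A).getD i A.length = j := by
                rw [nseOf_getD A i h, hin]; rfl
              rw [hj, if_neg (by omega)]
              exact ih j (some A[i])

-- ===== VERDICT (by name: the statement is the Claim_ definition above) =====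
theorem es2_spec : Claim_equal_es2 := by
  intro A _
  unfold Spec_es2 es2 es2_alt
  by_cases h : A.length = 0
  · rw [if_pos h, h]
    rfl
  · rw [if_neg h]
    exact outer_eq A A.length 0 none
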